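-- pv_equiv track=rewrite | github.com/DNAturation/mist | mistsim/mistpopper.py | writelister
-- ===== SOURCE A (Python) =====
-- def writelister(rankedlist, dgenome):
--     '''makes a list, with the number of genes removed and the number of genomes without missing genes, to be written
--     to csv file'''
--     writelist = []
--     for index, gene in enumerate(rankedlist): #iterates through the ordered list of the worst genes
--         puregenomes=0   #resets 'puregenomes' count every iteration of a new gene
--         for genome in dgenome:  #looks through the made dictionary of key genomes value list of genes and removes
--                                 #genes in the genome's list that match the current iteration
--             try:
--                 dgenome[genome].remove(gene)
--             except:
--                 pass
--
--             if dgenome[genome] == set():#checks for genomes that have no missing genes, if found, adds one for each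
--                 puregenomes+=1          #present genome to the puregenomes counter
--
--         writelist.append([index, puregenomes])  #makes a list of two items, number of genes removed and number of genomes
--                                                 #that are pure for future csv file writing
--
--     return writelist
-- ===== SOURCE B (Python) =====
-- def writelister(rankedlist, dgenome):
--     '''makes a list, with the number of genes removed and the number of genomes without missing genes, to be written
--     to csv file'''
--     # Index gene -> genome ids once, then drain counters incrementally: O(R + total genes)
--     # instead of rescanning every genome for every ranked gene.  Return value only: does
--     # not empty the sets in dgenome in place as the original does.
--     remaining = []
--     buckets = {}
--     pure = 0
--     for gid, genes in enumerate(dgenome.values()):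
--         remaining.append(len(genes))
--         if not genes:
--             pure += 1
--         for g in genes:
--             buckets.setdefault(g, []).append(gid)
--     writelist = []
--     for index, gene in enumerate(rankedlist):
--         for gid in buckets.pop(gene, ()):
--             remaining[gid] -= 1
--             if remaining[gid] == 0:
--                 pure += 1
--         writelist.append([index, pure])
--     return writelist
-- ===== Notes on version B (the rewrite author's own statement) =====
-- stated objective: faster
-- what changed: Instead of rescanning every genome's gene set for every ranked gene (try remove + emptiness test per genome per gene), B builds a gene-to-genome-occurrence index and per-genome remaining counters once, then drains the popped bucket of each ranked gene while a monotone 'pure' counter is updated incrementally; B does not mutate dgenome (A empties its sets in place).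
import Mathlib
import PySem

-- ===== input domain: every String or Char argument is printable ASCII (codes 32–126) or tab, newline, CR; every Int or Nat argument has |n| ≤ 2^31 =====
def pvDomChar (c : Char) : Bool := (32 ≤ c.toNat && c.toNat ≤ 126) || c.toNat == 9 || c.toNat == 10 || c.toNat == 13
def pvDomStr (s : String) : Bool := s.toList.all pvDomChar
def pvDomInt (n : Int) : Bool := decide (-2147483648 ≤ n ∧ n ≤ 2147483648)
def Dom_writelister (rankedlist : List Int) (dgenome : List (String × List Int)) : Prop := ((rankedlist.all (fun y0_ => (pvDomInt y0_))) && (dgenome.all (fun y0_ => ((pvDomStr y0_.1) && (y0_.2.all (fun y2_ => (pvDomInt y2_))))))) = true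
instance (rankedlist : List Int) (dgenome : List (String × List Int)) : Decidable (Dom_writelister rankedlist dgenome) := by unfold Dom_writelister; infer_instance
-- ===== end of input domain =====

-- B replaces A's per-gene rescan of every genome by a gene→genome-occurrence index drained
-- incrementally (objective: faster).  Equivalence is about the RETURN value only: the Python A
-- empties the sets stored in dgenome in place, B does not mutate dgenome.

-- ===== PORT A =====
-- dgenome is a Python dict[str, set[int]]; 'for genome in dgenome' walks its (distinct) keys and
-- 'dgenome[genome]' is that pair's value, so the loop is a left fold over the pair list.

-- try: dgenome[genome].remove(gene)  except: pass   (set.remove; the KeyError is swallowed)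
def pyRemovePass (v : List Int) (g : Int) : List Int :=
  match PySem.Set.remove? v g with
  | some w => w
  | none => v

-- the inner 'for genome in dgenome' loop: mutates each value, counts values equal to set()
def writelisterInner (g : Int) (pairs : List (String × List Int)) :
    List (String × List Int) × Int :=
  pairs.foldl (fun acc kv =>
    let v' := pyRemovePass kv.2 g
    (acc.1 ++ [(kv.1, v')], acc.2 + (if PySem.Set.equal v' [] then 1 else 0)))
    ([], 0)

-- the outer 'for index, gene in enumerate(rankedlist)' loop, threading the mutated dict
def writelisterLoop : Int → List Int → List (String × List Int) → List (List Int)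
  | _, [], _ => []
  | idx, g :: rest, pairs =>
    let r := writelisterInner g pairs
    [idx, r.2] :: writelisterLoop (idx + 1) rest r.1

def writelister (rankedlist : List Int) (dgenome : List (String × List Int)) : List (List Int) :=
  writelisterLoop 0 rankedlist dgenome

-- ===== PORT B =====
-- Source B identifies each genome by its position gid in dgenome.values() (enumerate); those
-- indices are the naturals 0,1,…, kept here as Nat.

-- 'for gid in buckets.pop(gene, ())': decrement remaining[gid], count the ones that hit 0
def writelisterDrain (gids : List Nat) (st : List Int × Int) : List Int × Int :=
  gids.foldl (fun st gid =>
    let r := st.1.set gid (st.1.getD gid 0 - 1)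
    (r, st.2 + (if r.getD gid 0 = 0 then 1 else 0))) st

-- the build loop 'for gid, genes in enumerate(dgenome.values())': remaining, buckets, pure
def writelisterBuild (vals : List (List Int)) :
    List Int × PySem.Dict Int (List Nat) × Int :=
  vals.zipIdx.foldl (fun st p =>
    (st.1 ++ [(p.1.length : Int)],
     p.1.foldl (fun b g => b.modify g [] (· ++ [p.2])) st.2.1,   -- buckets.setdefault(g, []).append(gid)
     st.2.2 + (if p.1 = [] then 1 else 0)))
    ([], PySem.Dict.empty, 0)

-- 'for index, gene in enumerate(rankedlist)': pop the gene's bucket, drain it, record pure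
def writelisterAltLoop : Int → List Int → PySem.Dict Int (List Nat) → List Int → Int → List (List Int)
  | _, [], _, _, _ => []
  | idx, g :: rest, bk, rem, pure =>
    let gids := bk.getD g []
    let bk' := bk.erase g
    let st := writelisterDrain gids (rem, pure)
    [idx, st.2] :: writelisterAltLoop (idx + 1) rest bk' st.1 st.2

def writelister_alt (rankedlist : List Int) (dgenome : List (String × List Int)) : List (List Int) :=
  let st := writelisterBuild (dgenome.map (·.2))
  writelisterAltLoop 0 rankedlist st.2.1 st.1 st.2.2

-- ===== PRECONDITION & SPEC =====
def Spec_writelister (rankedlist : List Int) (dgenome : List (String × List Int)) (out : List (List Int)) : Prop := out = writelister_alt rankedlist dgenome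
instance (rankedlist : List Int) (dgenome : List (String × List Int)) (out : List (List Int)) : Decidable (Spec_writelister rankedlist dgenome out) := by unfold Spec_writelister; infer_instance

-- ===== CLAIM (what is proved, stated in full; the proofs are below) =====
def Claim_equal_writelister : Prop := ∀ (rankedlist : List Int) (dgenome : List (String × List Int)), Dom_writelister rankedlist dgenome → Spec_writelister rankedlist dgenome (writelister rankedlist dgenome)

-- ===== LEMMAS AND PROOFS =====

-- The common reference: after processing the genes S, genome value v has become `pvF S v`,
-- and the pure count is `pvCnt S vals`.
def pvF (S : List Int) (v : List Int) : List Int := v.filter (fun x => !(S.contains x))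

def pvCnt (S : List Int) (vals : List (List Int)) : Int :=
  (vals.countP (fun v => (pvF S v).isEmpty) : Int)

def pvBucket (g : Int) (vals : List (List Int)) : List Nat :=
  vals.zipIdx.flatMap (fun p => (p.1.filter (· == g)).map (fun _ => p.2))

def pvSpecLoop (vals : List (List Int)) : Int → List Int → List Int → List (List Int)
  | _, [], _ => []
  | idx, g :: rest, S => [idx, pvCnt (g :: S) vals] :: pvSpecLoop vals (idx + 1) rest (g :: S)

lemma pv_set_equal_nil (v : List Int) : PySem.Set.equal v [] = v.isEmpty := by
  cases v <;> simp [PySem.Set.equal, PySem.Set.issubset, PySem.Set.contains]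

lemma pvF_nil (v : List Int) : pvF [] v = v := by
  simp [pvF]

lemma pv_not_contains_cons (g x : Int) (S : List Int) (hx : x = g → x ∈ S) :
    (!(g :: S).contains x) = (!S.contains x) := by
  by_cases hxg : x = g
  · subst hxg; simp [hx rfl]
  · simp [List.contains_cons, hxg]

lemma pvF_cons_of_mem (g : Int) (S v : List Int) (h : g ∈ S) :
    pvF (g :: S) v = pvF S v := by
  unfold pvF
  apply List.filter_congr
  intro x hx
  exact pv_not_contains_cons g x S (fun he => he ▸ h)

lemma pvRemovePass_F (g : Int) (S v : List Int) :
    pyRemovePass (pvF S v) g = pvF (g :: S) v := by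
  unfold pyRemovePass PySem.Set.remove?
  by_cases h : PySem.Set.contains (pvF S v) g = true
  · simp only [h, if_true]
    unfold PySem.Set.discard pvF
    rw [List.filter_filter]
    apply List.filter_congr
    intro x hx
    by_cases hxg : x = g <;> simp [List.contains_cons, hxg]
  · simp only [h, if_false]  -- g does not occur in the remaining set: removal is a no-op
    unfold pvF
    apply List.filter_congr
    intro x hx
    refine (pv_not_contains_cons g x S ?_).symm
    intro he
    subst he
    by_contra hgs
    apply h
    simp only [PySem.Set.contains, pvF, List.contains_iff_mem, List.mem_filter]
    exact ⟨hx, by simpa using hgs⟩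

lemma writelisterInner_eq (g : Int) (ps : List (String × List Int)) :
    writelisterInner g ps =
      (ps.map (fun kv => (kv.1, pyRemovePass kv.2 g)),
       (ps.countP (fun kv => (pyRemovePass kv.2 g).isEmpty) : Int)) := by
  unfold writelisterInner
  suffices h : ∀ (acc : List (String × List Int)) (c : Int),
      ps.foldl (fun acc kv =>
        let v' := pyRemovePass kv.2 g
        (acc.1 ++ [(kv.1, v')], acc.2 + (if PySem.Set.equal v' [] then 1 else 0)))
        (acc, c) =
      (acc ++ ps.map (fun kv => (kv.1, pyRemovePass kv.2 g)),
       c + (ps.countP (fun kv => (pyRemovePass kv.2 g).isEmpty) : Int)) by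
    simpa using h [] 0
  induction ps with
  | nil => intro acc c; simp
  | cons kv rest ih =>
      intro acc c
      simp only [List.foldl_cons, List.countP_cons, ih, Prod.mk.injEq]
      rw [pv_set_equal_nil]
      refine ⟨by simp, ?_⟩
      by_cases hv : (pyRemovePass kv.2 g).isEmpty <;> simp [hv] <;> push_cast <;> ring

lemma writelisterLoop_eq (d : List (String × List Int)) :
    ∀ (gs : List Int) (idx : Int) (S : List Int),
      writelisterLoop idx gs (d.map (fun kv => (kv.1, pvF S kv.2))) =
        pvSpecLoop (d.map (·.2)) idx gs S := by
  intro gs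
  induction gs with
  | nil => intro idx S; simp [writelisterLoop, pvSpecLoop]
  | cons g rest ih =>
      intro idx S
      rw [writelisterLoop, pvSpecLoop, writelisterInner_eq]
      dsimp only
      have hmap : (d.map (fun kv => (kv.1, pvF S kv.2))).map
            (fun kv => (kv.1, pyRemovePass kv.2 g)) =
          d.map (fun kv => (kv.1, pvF (g :: S) kv.2)) := by
        rw [List.map_map]
        apply List.map_congr_left
        intro kv _
        simp [Function.comp, pvRemovePass_F]
      have hcnt : ((List.countP (fun kv => (pyRemovePass kv.2 g).isEmpty)
            (d.map (fun kv => (kv.1, pvF S kv.2)))) : Int) =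
          pvCnt (g :: S) (d.map (·.2)) := by
        unfold pvCnt
        rw [List.countP_map, List.countP_map]
        congr 1
        apply List.countP_congr
        intro kv _
        simp [Function.comp, pvRemovePass_F]
      rw [hmap, hcnt, ih (idx + 1) (g :: S)]

lemma writelister_eq_spec (r : List Int) (d : List (String × List Int)) :
    writelister r d = pvSpecLoop (d.map (·.2)) 0 r [] := by
  have h := writelisterLoop_eq d r 0 []
  simpa [writelister, pvF_nil] using h

-- ---- B side ----

lemma pv_find?_filter_self (l : List (Int × List Nat)) (k : Int) :
    (l.filter (fun p => !(p.1 == k))).find? (fun p => p.1 == k) = none := by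
  rw [List.find?_eq_none]
  intro p hp
  rw [List.mem_filter] at hp
  simpa using hp.2

lemma pv_find?_filter_ne (l : List (Int × List Nat)) (k k' : Int) (h : k' ≠ k) :
    (l.filter (fun p => !(p.1 == k))).find? (fun p => p.1 == k') =
      l.find? (fun p => p.1 == k') := by
  induction l with
  | nil => rfl
  | cons p rest ih =>
      by_cases hp : p.1 = k
      · have h1 : (!(p.1 == k)) = false := by simp [hp]
        have h2 : (p.1 == k') = false := by simp [hp, Ne.symm h]
        simp [List.filter_cons, List.find?_cons, h1, h2, ih]
      · have h1 : (!(p.1 == k)) = true := by simp [hp]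
        by_cases hpk' : p.1 = k'
        · have h2 : (p.1 == k') = true := by simp [hpk']
          simp [List.filter_cons, List.find?_cons, h1, h2]
        · have h2 : (p.1 == k') = false := by simp [hpk']
          simp [List.filter_cons, List.find?_cons, h1, h2, ih]

lemma pv_getD_erase (d : PySem.Dict Int (List Nat)) (k k' : Int) :
    (d.erase k).getD k' [] = if k' = k then [] else d.getD k' [] := by
  rcases d with ⟨l⟩
  unfold PySem.Dict.erase PySem.Dict.getD PySem.Dict.get?
  by_cases h : k' = k
  · subst h; rw [pv_find?_filter_self]; simp
  · rw [pv_find?_filter_ne l k k' h]; simp [h]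

lemma pvBuild_aux (l : List (List Int × Nat)) :
    ∀ (a : List Int) (b : PySem.Dict Int (List Nat)) (c : Int),
    l.foldl (fun st p =>
      (st.1 ++ [(p.1.length : Int)],
       p.1.foldl (fun b g => b.modify g [] (· ++ [p.2])) st.2.1,
       st.2.2 + (if p.1 = [] then 1 else 0))) (a, b, c) =
    (a ++ l.map (fun p => ((p.1.length : Int))),
     (l.flatMap (fun p => p.1.map (fun g => (g, p.2)))).foldl
       (fun b x => b.modify x.1 [] (· ++ [x.2])) b,
     c + (l.countP (fun p => p.1.isEmpty) : Int)) := by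
  induction l with
  | nil => intro a b c; simp
  | cons p rest ih =>
      intro a b c
      simp only [List.foldl_cons, List.map_cons, List.flatMap_cons, List.countP_cons, ih,
        Prod.mk.injEq]
      refine ⟨by simp, ?_, ?_⟩
      · rw [List.foldl_append, List.foldl_map]
      · by_cases hv : p.1 = [] <;> simp [hv, List.isEmpty_iff] <;> push_cast <;> ring

lemma pv_map_fst_zipIdx (l : List (List Int)) (k : Nat) : (l.zipIdx k).map Prod.fst = l := by
  induction l generalizing k with
  | nil => rfl
  | cons x xs ih => simp [List.zipIdx_cons, ih]

lemma writelisterBuild_eq (vals : List (List Int)) :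
    writelisterBuild vals =
      (vals.map (fun v => (v.length : Int)),
       (vals.zipIdx.flatMap (fun p => p.1.map (fun g => (g, p.2)))).foldl
         (fun b x => b.modify x.1 [] (· ++ [x.2])) PySem.Dict.empty,
       (vals.countP (fun v => v.isEmpty) : Int)) := by
  unfold writelisterBuild
  rw [pvBuild_aux]
  have h1 : vals.zipIdx.map (fun p => ((p.1.length : Int))) =
      vals.map (fun v => ((v.length : Int))) := by
    rw [show (fun p : List Int × Nat => ((p.1.length : Int))) =
          ((fun v : List Int => ((v.length : Int))) ∘ Prod.fst) from rfl,
        ← List.map_map, pv_map_fst_zipIdx]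
  have h3 : vals.zipIdx.countP (fun p => p.1.isEmpty) = vals.countP (fun v => v.isEmpty) := by
    rw [show (fun p : List Int × Nat => p.1.isEmpty) =
          ((fun v : List Int => v.isEmpty) ∘ Prod.fst) from rfl,
        ← List.countP_map, pv_map_fst_zipIdx]
  rw [h1, h3]
  simp

lemma writelisterBuild_buckets (vals : List (List Int)) (g : Int) :
    (writelisterBuild vals).2.1.getD g [] = pvBucket g vals := by
  rw [writelisterBuild_eq]
  dsimp only
  rw [PySem.Dict.getD_foldl_modify_append]
  simp only [PySem.Dict.getD_empty, List.nil_append]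
  unfold pvBucket
  induction vals.zipIdx with
  | nil => rfl
  | cons p rest ih =>
      simp only [List.flatMap_cons, List.filter_append, List.map_append, ih]
      congr 1
      rw [List.filter_map, List.map_map]
      rfl

lemma writelisterDrain_append (a b : List Nat) (st : List Int × Int) :
    writelisterDrain (a ++ b) st = writelisterDrain b (writelisterDrain a st) := by
  unfold writelisterDrain
  rw [List.foldl_append]

lemma writelisterDrain_add (js : List Nat) (rem : List Int) (p k : Int) :
    writelisterDrain js (rem, p + k) =
      ((writelisterDrain js (rem, p)).1, (writelisterDrain js (rem, p)).2 + k) := by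
  induction js generalizing rem p with
  | nil => simp [writelisterDrain]
  | cons j rest ih =>
      simp only [writelisterDrain, List.foldl_cons] at *
      rw [show p + k + (if (rem.set j (rem.getD j 0 - 1)).getD j 0 = 0 then (1:Int) else 0) =
            (p + (if (rem.set j (rem.getD j 0 - 1)).getD j 0 = 0 then (1:Int) else 0)) + k by ring]
      exact ih _ _

lemma writelisterDrain_append_last (js : List Nat) (rem : List Int) (x p : Int)
    (h : ∀ j ∈ js, j < rem.length) :
    writelisterDrain js (rem ++ [x], p) =
      ((writelisterDrain js (rem, p)).1 ++ [x], (writelisterDrain js (rem, p)).2) := by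
  induction js generalizing rem p with
  | nil => simp [writelisterDrain]
  | cons j rest ih =>
      have hj : j < rem.length := h j (by simp)
      simp only [writelisterDrain, List.foldl_cons] at *
      rw [List.getD_append _ _ _ _ hj]
      rw [List.set_append_left _ _ hj]
      rw [List.getD_append _ _ _ _ (by simpa using hj)]
      exact ih _ _ (fun j' hj' => by simpa using h j' (by simp [hj']))

lemma writelisterDrain_replicate (c : Nat) (rem : List Int) (x p : Int) :
    writelisterDrain (List.replicate c rem.length) (rem ++ [x], p) =
      (rem ++ [x - c], p + (if 1 ≤ x ∧ x ≤ (c : Int) then 1 else 0)) := by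
  induction c generalizing x p with
  | zero =>
      simp only [List.replicate_zero, Nat.cast_zero, sub_zero]
      rw [if_neg (by omega : ¬(1 ≤ x ∧ x ≤ (0 : Int)))]
      simp [writelisterDrain]
  | succ n ih =>
      rw [List.replicate_succ]
      simp only [writelisterDrain, List.foldl_cons] at *
      have hget : (rem ++ [x]).getD rem.length 0 = x := by
        simp [List.getD, List.getElem?_concat_length]
      have hset : (rem ++ [x]).set rem.length (x - 1) = rem ++ [x - 1] := by
        simp [List.set_append]
      rw [hget, hset,
        show (rem ++ [x - 1]).getD rem.length 0 = x - 1 by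
          simp [List.getD, List.getElem?_concat_length]]
      rw [ih (x - 1) (p + if x - 1 = 0 then 1 else 0)]
      refine Prod.ext ?_ ?_
      · dsimp only
        congr 2
        push_cast
        ring
      · dsimp only
        by_cases h1 : x - 1 = 0 <;> split_ifs <;> push_cast at * <;> omega

lemma pvBucket_append (g : Int) (vals : List (List Int)) (v : List Int) :
    pvBucket g (vals ++ [v]) =
      pvBucket g vals ++ List.replicate (v.count g) vals.length := by
  unfold pvBucket
  rw [List.zipIdx_append, List.flatMap_append]
  congr 1
  have hz : ([v].zipIdx (0 + vals.length)) = [(v, vals.length)] := by simp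
  rw [hz]
  simp only [List.flatMap_cons, List.flatMap_nil, List.append_nil]
  rw [List.map_const', List.count_eq_length_filter]

lemma pvBucket_lt (g : Int) (vals : List (List Int)) :
    ∀ j ∈ pvBucket g vals, j < vals.length := by
  intro j hj
  unfold pvBucket at hj
  rw [List.mem_flatMap] at hj
  obtain ⟨p, hp, hj2⟩ := hj
  rw [List.mem_map] at hj2
  obtain ⟨_, _, rfl⟩ := hj2
  have := List.mem_zipIdx hp
  omega

lemma pvF_length_add (g : Int) (S v : List Int) (hg : S.contains g = false) :
    (pvF (g :: S) v).length + v.count g = (pvF S v).length := by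
  have hg' : g ∉ S := by simpa using hg
  induction v with
  | nil => simp [pvF]
  | cons x v ih =>
      by_cases hxg : x = g
      · subst hxg
        simp only [pvF, List.filter_cons, List.count_cons, List.contains_cons] at *
        simp [hg'] at *
        omega
      · by_cases hs : x ∈ S <;>
          · simp only [pvF, List.filter_cons, List.count_cons, List.contains_cons] at *
            simp [hxg, hs, Ne.symm hxg] at *
            omega

lemma writelisterDrain_main (g : Int) (S : List Int) (hg : S.contains g = false)
    (vals : List (List Int)) :
    writelisterDrain (pvBucket g vals)
        (vals.map (fun v => ((pvF S v).length : Int)), pvCnt S vals) =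
      (vals.map (fun v => ((pvF (g :: S) v).length : Int)), pvCnt (g :: S) vals) := by
  induction vals using List.reverseRecOn with
  | nil => simp [writelisterDrain, pvBucket, pvCnt]
  | append_singleton vals v ih =>
      have hcnt : ∀ T : List Int, pvCnt T (vals ++ [v]) =
          pvCnt T vals + (if (pvF T v).length = 0 then 1 else 0) := by
        intro T
        unfold pvCnt
        rw [List.countP_append]
        have hone : (List.countP (fun w => (pvF T w).isEmpty) [v]) =
            if (pvF T v).length = 0 then 1 else 0 := by
          by_cases hT : pvF T v = [] <;> simp [hT, List.length_eq_zero_iff]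
        rw [hone]
        push_cast
        split_ifs <;> ring
      rw [pvBucket_append, writelisterDrain_append, List.map_append, List.map_append,
        hcnt S, hcnt (g :: S)]
      dsimp only [List.map_cons, List.map_nil]
      rw [writelisterDrain_add, writelisterDrain_append_last _ _ _ _
        (by intro j hj; rw [List.length_map]; exact pvBucket_lt g vals j hj), ih]
      dsimp only
      rw [show vals.length = (vals.map (fun v => ((pvF (g :: S) v).length : Int))).length by
        simp]
      rw [writelisterDrain_replicate]
      have hlen := pvF_length_add g S v hg
      refine Prod.ext ?_ ?_
      · dsimp only
        congr 2
        push_cast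
        omega
      · dsimp only
        split_ifs <;> push_cast at * <;> omega

lemma writelisterAltLoop_eq (vals : List (List Int)) :
    ∀ (gs : List Int) (idx : Int) (S : List Int) (bk : PySem.Dict Int (List Nat))
      (rem : List Int) (pure : Int),
      (∀ g, bk.getD g [] = if S.contains g then [] else pvBucket g vals) →
      rem = vals.map (fun v => ((pvF S v).length : Int)) →
      pure = pvCnt S vals →
      writelisterAltLoop idx gs bk rem pure = pvSpecLoop vals idx gs S := by
  intro gs
  induction gs with
  | nil => intro idx S bk rem pure _ _ _; simp [writelisterAltLoop, pvSpecLoop]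
  | cons g rest ih =>
      intro idx S bk rem pure hbk hrem hpure
      rw [writelisterAltLoop, pvSpecLoop]
      have hbk' : ∀ g', (bk.erase g).getD g' [] =
          if (g :: S).contains g' then [] else pvBucket g' vals := by
        intro g'
        rw [pv_getD_erase, hbk g']
        rcases eq_or_ne g' g with h1 | h1
        · simp [h1]
        · simp [h1, List.contains_cons]
      by_cases hc : S.contains g = true
      · -- gene already processed: its bucket was popped, nothing changes
        have hmem : g ∈ S := by simpa using hc
        have hF : pvCnt (g :: S) vals = pvCnt S vals := by
          unfold pvCnt
          congr 1
          apply List.countP_congr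
          intro v _
          rw [pvF_cons_of_mem g S v hmem]
        have hFm : vals.map (fun v => ((pvF (g :: S) v).length : Int)) =
            vals.map (fun v => ((pvF S v).length : Int)) := by
          apply List.map_congr_left
          intro v _
          rw [pvF_cons_of_mem g S v hmem]
        rw [hbk g, if_pos hc]
        simp only [writelisterDrain, List.foldl_nil]
        rw [ih (idx + 1) (g :: S) (bk.erase g) rem pure hbk'
          (by rw [hrem, ← hFm]) (by rw [hpure, ← hF])]
        rw [hpure, hF]
      · have hg : S.contains g = false := by simpa using hc
        subst hrem hpure
        rw [hbk g, if_neg hc, writelisterDrain_main g S hg vals]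
        dsimp only
        congr 1
        exact ih (idx + 1) (g :: S) (bk.erase g) _ _ hbk' rfl rfl

lemma writelister_alt_eq_spec (r : List Int) (d : List (String × List Int)) :
    writelister_alt r d = pvSpecLoop (d.map (·.2)) 0 r [] := by
  unfold writelister_alt
  apply writelisterAltLoop_eq
  · intro g
    simp only [List.contains_nil, Bool.false_eq_true, if_false]
    exact writelisterBuild_buckets _ g
  · rw [writelisterBuild_eq]
    dsimp only
    apply List.map_congr_left
    intro v _
    rw [pvF_nil]
  · rw [writelisterBuild_eq]
    dsimp only
    unfold pvCnt
    congr 1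
    apply List.countP_congr
    intro v _
    rw [pvF_nil]

-- ===== VERDICT (by name: the statement is the Claim_ definition above) =====
theorem writelister_spec : Claim_equal_writelister := by
  intro r d _
  unfold Spec_writelister
  rw [writelister_eq_spec, writelister_alt_eq_spec]
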